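-- pv_equiv track=rewrite | github.com/tjdms4327/Baekjoon_Python | 백준/Bronze/7015. Millennium/Millennium.py | days_until
-- ===== SOURCE A (Python) =====
-- def days_until(y, m, d):
--     days = d-1
--     for year in range(1, y):
--         if year % 3 == 0:
--             days += 200
--         else:
--             days += 195
--     for month in range(1, m):
--         if y % 3 == 0:
--             days += 20
--         else:
--             if month % 2 == 1:
--                 days += 20
--             else:
--                 days += 19
--     return days
-- ===== SOURCE B (Python) =====
-- def days_until(y, m, d):
--     days = d - 1
--     if y > 1:
--         days += 195 * (y - 1) + 5 * ((y - 1) // 3)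
--     if m > 1:
--         if y % 3 == 0:
--             days += 20 * (m - 1)
--         else:
--             days += 19 * (m - 1) + m // 2
--     return days
-- ===== Notes on version B (the rewrite author's own statement) =====
-- stated objective: faster
-- what changed: Replaced the two per-year/per-month accumulation loops with closed-form arithmetic: 195*(y-1)+5*((y-1)//3) for the years and 19*(m-1)+m//2 (or 20*(m-1) when y%3==0) for the months.
import Mathlib
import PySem

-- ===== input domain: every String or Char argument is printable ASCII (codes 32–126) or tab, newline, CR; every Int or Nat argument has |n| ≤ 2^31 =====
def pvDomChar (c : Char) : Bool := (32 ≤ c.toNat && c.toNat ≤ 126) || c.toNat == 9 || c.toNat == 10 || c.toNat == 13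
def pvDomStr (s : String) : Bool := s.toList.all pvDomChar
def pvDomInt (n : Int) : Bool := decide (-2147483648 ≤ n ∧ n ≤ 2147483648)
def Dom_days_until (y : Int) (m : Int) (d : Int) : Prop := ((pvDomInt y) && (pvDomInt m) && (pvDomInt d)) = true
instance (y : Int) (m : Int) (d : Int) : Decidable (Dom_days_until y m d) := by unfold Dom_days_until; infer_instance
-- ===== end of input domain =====

-- B replaces A's two per-unit loops with closed-form arithmetic (O(1) instead of O(y+m)); same return value on all int inputs.

-- ===== PORT A =====
-- literal port: two for-loops over range(1, y) and range(1, m)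
def days_until (y : Int) (m : Int) (d : Int) : Int :=
  let days := d - 1
  let days := (PySem.List.pyRange 1 y 1).foldl
    (fun days year => if PySem.Int.mod year 3 = 0 then days + 200 else days + 195) days
  let days := (PySem.List.pyRange 1 m 1).foldl
    (fun days month =>
      if PySem.Int.mod y 3 = 0 then days + 20
      else if PySem.Int.mod month 2 = 1 then days + 20 else days + 19) days
  days

-- ===== PORT B =====
-- closed-form arithmetic, no loops (from Source B)
def days_until_alt (y : Int) (m : Int) (d : Int) : Int :=
  let days := d - 1
  let days := if y > 1 then days + (195 * (y - 1) + 5 * PySem.Int.floordiv (y - 1) 3) else days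
  if m > 1 then
    if PySem.Int.mod y 3 = 0 then days + 20 * (m - 1)
    else days + (19 * (m - 1) + PySem.Int.floordiv m 2)
  else days

-- ===== PRECONDITION & SPEC =====
def Spec_days_until (y : Int) (m : Int) (d : Int) (out : Int) : Prop := out = days_until_alt y m d
instance (y : Int) (m : Int) (d : Int) (out : Int) : Decidable (Spec_days_until y m d out) := by unfold Spec_days_until; infer_instance

-- ===== CLAIM (what is proved, stated in full; the proofs are below) =====
def Claim_equal_days_until : Prop := ∀ (y : Int) (m : Int) (d : Int), Dom_days_until y m d → Spec_days_until y m d (days_until y m d)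

-- ===== LEMMAS AND PROOFS =====

-- the year loop, closed form
theorem year_loop_closed (y : Int) (acc : Int) :
    (PySem.List.pyRange 1 y 1).foldl
      (fun days year => if PySem.Int.mod year 3 = 0 then days + 200 else days + 195) acc
    = if y > 1 then acc + (195 * (y - 1) + 5 * PySem.Int.floordiv (y - 1) 3) else acc := by
  by_cases hy : y > 1
  · simp only [if_pos hy]
    have key : ∀ z : Int, 1 ≤ z →
        (PySem.List.pyRange 1 z 1).foldl
          (fun days year => if PySem.Int.mod year 3 = 0 then days + 200 else days + 195) acc
        = acc + (195 * (z - 1) + 5 * PySem.Int.floordiv (z - 1) 3) := by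
      intro z hz
      induction z, hz using Int.le_induction with
      | base => simp [PySem.List.pyRange_one_eq_nil (le_refl (1:Int)), PySem.Int.floordiv]
      | succ w hw ih =>
        rw [PySem.List.pyRange_one_succ_right hw, List.foldl_append, ih]
        simp only [List.foldl_cons, List.foldl_nil]
        rw [PySem.Int.mod_eq_emod_of_pos (a := w) (by omega),
            PySem.Int.floordiv_eq_ediv_of_pos (a := w-1) (by omega),
            PySem.Int.floordiv_eq_ediv_of_pos (a := w+1-1) (by omega)]
        split_ifs with h <;> omega
    exact key y (by omega)
  · rw [PySem.List.pyRange_one_eq_nil (by omega)]; simp [hy]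

-- the month loop, closed form
theorem month_loop_closed (y m : Int) (acc : Int) :
    (PySem.List.pyRange 1 m 1).foldl
      (fun days month =>
        if PySem.Int.mod y 3 = 0 then days + 20
        else if PySem.Int.mod month 2 = 1 then days + 20 else days + 19) acc
    = if m > 1 then
        (if PySem.Int.mod y 3 = 0 then acc + 20 * (m - 1)
         else acc + (19 * (m - 1) + PySem.Int.floordiv m 2))
      else acc := by
  by_cases hm : m > 1
  · simp only [if_pos hm]
    have key : ∀ z : Int, 1 ≤ z →
        (PySem.List.pyRange 1 z 1).foldl
          (fun days month =>
            if PySem.Int.mod y 3 = 0 then days + 20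
            else if PySem.Int.mod month 2 = 1 then days + 20 else days + 19) acc
        = (if PySem.Int.mod y 3 = 0 then acc + 20 * (z - 1)
           else acc + (19 * (z - 1) + PySem.Int.floordiv z 2)) := by
      intro z hz
      induction z, hz using Int.le_induction with
      | base =>
        rw [PySem.List.pyRange_one_eq_nil (le_refl (1:Int))]
        rw [PySem.Int.floordiv_eq_ediv_of_pos (a := 1) (b := 2) (by omega)]
        split_ifs <;> simp
      | succ w hw ih =>
        rw [PySem.List.pyRange_one_succ_right hw, List.foldl_append, ih]
        simp only [List.foldl_cons, List.foldl_nil]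
        rw [PySem.Int.mod_eq_emod_of_pos (a := w) (by omega),
            PySem.Int.floordiv_eq_ediv_of_pos (a := w) (by omega),
            PySem.Int.floordiv_eq_ediv_of_pos (a := w+1) (by omega)]
        split_ifs with h1 h2 <;> omega
    exact key m (by omega)
  · rw [PySem.List.pyRange_one_eq_nil (by omega)]; simp [hm]

-- ===== VERDICT (by name: the statement is the Claim_ definition above) =====
theorem days_until_spec : Claim_equal_days_until := by
  intro y m d _
  unfold Spec_days_until days_until days_until_alt
  simp only [year_loop_closed, month_loop_closed]
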